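-- pv_equiv track=rewrite | github.com/HelmiTounssi/Segmentez-des-clients-d-un-site-e-commerce | P5_Openclassroom_Functions.py | classify_cat
-- ===== SOURCE A (Python) =====
-- def classify_cat(x):
--     categories = {
--         'Furniture': ['office_furniture', 'furniture_decor', 'furniture_living_room', 'kitchen_dining_laundry_garden_furniture', 'bed_bath_table', 'home_comfort', 'home_comfort_2', 'home_construction', 'garden_tools', 'furniture_bedroom', 'furniture_mattress_and_upholstery'],
--         'Electronics': ['auto', 'computers_accessories', 'musical_instruments', 'consoles_games', 'watches_gifts', 'air_conditioning', 'telephony', 'electronics', 'fixed_telephony', 'tablets_printing_image', 'computers', 'small_appliances_home_oven_and_coffee', 'small_appliances', 'audio', 'signaling_and_security', 'security_and_services'],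
--         'Fashion': ['fashio_female_clothing', 'fashion_male_clothing', 'fashion_bags_accessories', 'fashion_shoes', 'fashion_sport', 'fashion_underwear_beach', 'fashion_childrens_clothes', 'baby', 'cool_stuff'],
--         'Home & Garden': ['housewares', 'home_confort', 'home_appliances', 'home_appliances_2', 'flowers', 'costruction_tools_garden', 'garden_tools', 'construction_tools_lights', 'costruction_tools_tools', 'luggage_accessories', 'la_cuisine', 'pet_shop', 'market_place'],
--         'Entertainment': ['sports_leisure', 'toys', 'cds_dvds_musicals', 'music', 'dvds_blu_ray', 'cine_photo', 'party_supplies', 'christmas_supplies', 'arts_and_craftmanship', 'art'],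
--         'Beauty & Health': ['health_beauty', 'perfumery', 'diapers_and_hygiene'],
--         'Food & Drinks': ['food_drink', 'drinks', 'food'],
--         'Books & Stationery': ['books_general_interest', 'books_technical', 'books_imported', 'stationery'],
--         'Industry & Construction': ['construction_tools_construction', 'construction_tools_safety', 'industry_commerce_and_business', 'agro_industry_and_commerce']
--     }
--     for category, keywords in categories.items():
--         if x in keywords:
--             return category
--     return None
-- ===== SOURCE B (Python) =====
-- # Flat keyword -> group dictionary written out once (the duplicate 'garden_tools'
-- # keeps its first group, Furniture); the function is a single dict lookup.
-- _LOOKUP = {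
--     'office_furniture': 'Furniture',
--     'furniture_decor': 'Furniture',
--     'furniture_living_room': 'Furniture',
--     'kitchen_dining_laundry_garden_furniture': 'Furniture',
--     'bed_bath_table': 'Furniture',
--     'home_comfort': 'Furniture',
--     'home_comfort_2': 'Furniture',
--     'home_construction': 'Furniture',
--     'garden_tools': 'Furniture',
--     'furniture_bedroom': 'Furniture',
--     'furniture_mattress_and_upholstery': 'Furniture',
--     'auto': 'Electronics',
--     'computers_accessories': 'Electronics',
--     'musical_instruments': 'Electronics',
--     'consoles_games': 'Electronics',
--     'watches_gifts': 'Electronics',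
--     'air_conditioning': 'Electronics',
--     'telephony': 'Electronics',
--     'electronics': 'Electronics',
--     'fixed_telephony': 'Electronics',
--     'tablets_printing_image': 'Electronics',
--     'computers': 'Electronics',
--     'small_appliances_home_oven_and_coffee': 'Electronics',
--     'small_appliances': 'Electronics',
--     'audio': 'Electronics',
--     'signaling_and_security': 'Electronics',
--     'security_and_services': 'Electronics',
--     'fashio_female_clothing': 'Fashion',
--     'fashion_male_clothing': 'Fashion',
--     'fashion_bags_accessories': 'Fashion',
--     'fashion_shoes': 'Fashion',
--     'fashion_sport': 'Fashion',
--     'fashion_underwear_beach': 'Fashion',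
--     'fashion_childrens_clothes': 'Fashion',
--     'baby': 'Fashion',
--     'cool_stuff': 'Fashion',
--     'housewares': 'Home & Garden',
--     'home_confort': 'Home & Garden',
--     'home_appliances': 'Home & Garden',
--     'home_appliances_2': 'Home & Garden',
--     'flowers': 'Home & Garden',
--     'costruction_tools_garden': 'Home & Garden',
--     'construction_tools_lights': 'Home & Garden',
--     'costruction_tools_tools': 'Home & Garden',
--     'luggage_accessories': 'Home & Garden',
--     'la_cuisine': 'Home & Garden',
--     'pet_shop': 'Home & Garden',
--     'market_place': 'Home & Garden',
--     'sports_leisure': 'Entertainment',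
--     'toys': 'Entertainment',
--     'cds_dvds_musicals': 'Entertainment',
--     'music': 'Entertainment',
--     'dvds_blu_ray': 'Entertainment',
--     'cine_photo': 'Entertainment',
--     'party_supplies': 'Entertainment',
--     'christmas_supplies': 'Entertainment',
--     'arts_and_craftmanship': 'Entertainment',
--     'art': 'Entertainment',
--     'health_beauty': 'Beauty & Health',
--     'perfumery': 'Beauty & Health',
--     'diapers_and_hygiene': 'Beauty & Health',
--     'food_drink': 'Food & Drinks',
--     'drinks': 'Food & Drinks',
--     'food': 'Food & Drinks',
--     'books_general_interest': 'Books & Stationery',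
--     'books_technical': 'Books & Stationery',
--     'books_imported': 'Books & Stationery',
--     'stationery': 'Books & Stationery',
--     'construction_tools_construction': 'Industry & Construction',
--     'construction_tools_safety': 'Industry & Construction',
--     'industry_commerce_and_business': 'Industry & Construction',
--     'agro_industry_and_commerce': 'Industry & Construction',
-- }
--
-- def classify_cat(x):
--     return _LOOKUP.get(x)
-- ===== Notes on version B (the rewrite author's own statement) =====
-- stated objective: idiomatic
-- what changed: Replaces the per-call loop scanning per-group keyword lists by a flat keyword-to-group dictionary written out once (the duplicate 'garden_tools' kept with its first group, Furniture), the function body reducing to a single dict.get(x).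
import Mathlib
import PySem

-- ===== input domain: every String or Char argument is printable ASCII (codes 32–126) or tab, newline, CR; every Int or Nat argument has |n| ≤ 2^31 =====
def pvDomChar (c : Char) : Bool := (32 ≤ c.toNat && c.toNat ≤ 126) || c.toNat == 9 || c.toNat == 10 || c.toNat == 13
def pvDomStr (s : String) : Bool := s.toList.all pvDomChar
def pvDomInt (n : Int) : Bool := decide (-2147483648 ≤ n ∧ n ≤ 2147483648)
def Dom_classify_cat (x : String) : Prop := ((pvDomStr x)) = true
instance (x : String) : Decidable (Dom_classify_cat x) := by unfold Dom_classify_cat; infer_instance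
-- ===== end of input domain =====

-- B replaces A's per-call scan of per-group keyword lists by a flat keyword→group table
-- written out once (first occurrence of the duplicate 'garden_tools' kept) and a single lookup (objective: idiomatic).


-- ===== PORT A =====
-- A's dict literal of categories (dict.items() in insertion order)
def pvCategories : List (String × List String) :=
  [ ("Furniture", ["office_furniture", "furniture_decor", "furniture_living_room", "kitchen_dining_laundry_garden_furniture", "bed_bath_table", "home_comfort", "home_comfort_2", "home_construction", "garden_tools", "furniture_bedroom", "furniture_mattress_and_upholstery"]),
    ("Electronics", ["auto", "computers_accessories", "musical_instruments", "consoles_games", "watches_gifts", "air_conditioning", "telephony", "electronics", "fixed_telephony", "tablets_printing_image", "computers", "small_appliances_home_oven_and_coffee", "small_appliances", "audio", "signaling_and_security", "security_and_services"]),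
    ("Fashion", ["fashio_female_clothing", "fashion_male_clothing", "fashion_bags_accessories", "fashion_shoes", "fashion_sport", "fashion_underwear_beach", "fashion_childrens_clothes", "baby", "cool_stuff"]),
    ("Home & Garden", ["housewares", "home_confort", "home_appliances", "home_appliances_2", "flowers", "costruction_tools_garden", "garden_tools", "construction_tools_lights", "costruction_tools_tools", "luggage_accessories", "la_cuisine", "pet_shop", "market_place"]),
    ("Entertainment", ["sports_leisure", "toys", "cds_dvds_musicals", "music", "dvds_blu_ray", "cine_photo", "party_supplies", "christmas_supplies", "arts_and_craftmanship", "art"]),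
    ("Beauty & Health", ["health_beauty", "perfumery", "diapers_and_hygiene"]),
    ("Food & Drinks", ["food_drink", "drinks", "food"]),
    ("Books & Stationery", ["books_general_interest", "books_technical", "books_imported", "stationery"]),
    ("Industry & Construction", ["construction_tools_construction", "construction_tools_safety", "industry_commerce_and_business", "agro_industry_and_commerce"]) ]

-- A's loop 'for category, keywords in categories.items(): if x in keywords: return category'
def pvScanA (x : String) : List (String × List String) → Option String
  | [] => none
  | (category, keywords) :: rest =>
      if x ∈ keywords then some category else pvScanA x rest

def classify_cat (x : String) : Option String := pvScanA x pvCategories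

-- ===== PORT B =====
-- B's flat dict literal _LOOKUP (distinct keys; association list, first match)
def pvLookupB : List (String × String) :=
  [ ("office_furniture", "Furniture"),
    ("furniture_decor", "Furniture"),
    ("furniture_living_room", "Furniture"),
    ("kitchen_dining_laundry_garden_furniture", "Furniture"),
    ("bed_bath_table", "Furniture"),
    ("home_comfort", "Furniture"),
    ("home_comfort_2", "Furniture"),
    ("home_construction", "Furniture"),
    ("garden_tools", "Furniture"),
    ("furniture_bedroom", "Furniture"),
    ("furniture_mattress_and_upholstery", "Furniture"),
    ("auto", "Electronics"),
    ("computers_accessories", "Electronics"),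
    ("musical_instruments", "Electronics"),
    ("consoles_games", "Electronics"),
    ("watches_gifts", "Electronics"),
    ("air_conditioning", "Electronics"),
    ("telephony", "Electronics"),
    ("electronics", "Electronics"),
    ("fixed_telephony", "Electronics"),
    ("tablets_printing_image", "Electronics"),
    ("computers", "Electronics"),
    ("small_appliances_home_oven_and_coffee", "Electronics"),
    ("small_appliances", "Electronics"),
    ("audio", "Electronics"),
    ("signaling_and_security", "Electronics"),
    ("security_and_services", "Electronics"),
    ("fashio_female_clothing", "Fashion"),
    ("fashion_male_clothing", "Fashion"),
    ("fashion_bags_accessories", "Fashion"),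
    ("fashion_shoes", "Fashion"),
    ("fashion_sport", "Fashion"),
    ("fashion_underwear_beach", "Fashion"),
    ("fashion_childrens_clothes", "Fashion"),
    ("baby", "Fashion"),
    ("cool_stuff", "Fashion"),
    ("housewares", "Home & Garden"),
    ("home_confort", "Home & Garden"),
    ("home_appliances", "Home & Garden"),
    ("home_appliances_2", "Home & Garden"),
    ("flowers", "Home & Garden"),
    ("costruction_tools_garden", "Home & Garden"),
    ("construction_tools_lights", "Home & Garden"),
    ("costruction_tools_tools", "Home & Garden"),
    ("luggage_accessories", "Home & Garden"),
    ("la_cuisine", "Home & Garden"),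
    ("pet_shop", "Home & Garden"),
    ("market_place", "Home & Garden"),
    ("sports_leisure", "Entertainment"),
    ("toys", "Entertainment"),
    ("cds_dvds_musicals", "Entertainment"),
    ("music", "Entertainment"),
    ("dvds_blu_ray", "Entertainment"),
    ("cine_photo", "Entertainment"),
    ("party_supplies", "Entertainment"),
    ("christmas_supplies", "Entertainment"),
    ("arts_and_craftmanship", "Entertainment"),
    ("art", "Entertainment"),
    ("health_beauty", "Beauty & Health"),
    ("perfumery", "Beauty & Health"),
    ("diapers_and_hygiene", "Beauty & Health"),
    ("food_drink", "Food & Drinks"),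
    ("drinks", "Food & Drinks"),
    ("food", "Food & Drinks"),
    ("books_general_interest", "Books & Stationery"),
    ("books_technical", "Books & Stationery"),
    ("books_imported", "Books & Stationery"),
    ("stationery", "Books & Stationery"),
    ("construction_tools_construction", "Industry & Construction"),
    ("construction_tools_safety", "Industry & Construction"),
    ("industry_commerce_and_business", "Industry & Construction"),
    ("agro_industry_and_commerce", "Industry & Construction") ]

-- B's body: return _LOOKUP.get(x)
def classify_cat_alt (x : String) : Option String := pvLookupB.lookup x

-- ===== PRECONDITION & SPEC =====
def Spec_classify_cat (x : String) (out : Option String) : Prop := out = classify_cat_alt x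
instance (x : String) (out : Option String) : Decidable (Spec_classify_cat x out) := by unfold Spec_classify_cat; infer_instance

-- ===== CLAIM =====
def Claim_equal_classify_cat : Prop := ∀ (x : String), Dom_classify_cat x → Spec_classify_cat x (classify_cat x)

-- ===== LEMMAS AND PROOFS =====

-- the flattening of A's grouped table into keyword→category pairs (proof-only)
def pvFlat (cats : List (String × List String)) : List (String × String) :=
  cats.flatMap (fun p => p.2.map (fun k => (k, p.1)))

theorem pv_lookup_map_const (x c : String) (ks : List String) :
    (ks.map (fun k => (k, c))).lookup x = if x ∈ ks then some c else none := by
  induction ks with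
  | nil => simp
  | cons k rest ih =>
      by_cases hx : x = k
      · simp [hx]
      · have hb : (x == k) = false := beq_false_of_ne hx
        simp [List.lookup, hb, ih, hx]

theorem pv_lookup_append (x : String) (l₁ l₂ : List (String × String)) :
    (l₁ ++ l₂).lookup x = (l₁.lookup x).or (l₂.lookup x) := by
  induction l₁ with
  | nil => simp
  | cons p rest ih =>
      cases p with
      | mk k v =>
        by_cases hx : x = k
        · simp [List.lookup, hx]
        · have hb : (x == k) = false := beq_false_of_ne hx
          simp [List.lookup, hb, ih]

-- A's grouped scan computes the first match in the flattened pair list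
theorem pv_flat_cons (p : String × List String) (rest : List (String × List String)) :
    pvFlat (p :: rest) = p.2.map (fun k => (k, p.1)) ++ pvFlat rest := rfl

theorem pv_scan_eq_lookup_flat (x : String) (cats : List (String × List String)) :
    pvScanA x cats = (pvFlat cats).lookup x := by
  induction cats with
  | nil => simp [pvScanA, pvFlat]
  | cons p rest ih =>
      rw [pv_flat_cons, pv_lookup_append, pv_lookup_map_const]
      simp only [pvScanA]
      by_cases hm : x ∈ p.2 <;> simp [hm, ih]

-- a later pair whose key is already bound earlier never affects the first match
theorem pv_lookup_shadow (x k v : String) (l₁ l₂ : List (String × String))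
    (h : (l₁.lookup k).isSome) :
    (l₁ ++ (k, v) :: l₂).lookup x = (l₁ ++ l₂).lookup x := by
  rw [pv_lookup_append, pv_lookup_append]
  by_cases hx : x = k
  · subst hx
    cases hl : l₁.lookup x with
    | none => rw [hl] at h; simp at h
    | some w => simp
  · have hb : (x == k) = false := beq_false_of_ne hx
    simp [List.lookup, hb]

-- the flattened table is B's flat table with the duplicate 'garden_tools' entry reinserted
theorem pv_flat_split :
    pvFlat pvCategories
      = pvLookupB.take 42 ++ ("garden_tools", "Home & Garden") :: pvLookupB.drop 42 := by
  decide

-- ===== VERDICT =====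
theorem classify_cat_spec : Claim_equal_classify_cat := by
  intro x _
  unfold Spec_classify_cat classify_cat classify_cat_alt
  rw [pv_scan_eq_lookup_flat, pv_flat_split, pv_lookup_shadow, List.take_append_drop]
  decide
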